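-- pv_equiv track=rewrite | github.com/teremterem/MiniAgents | miniagents/ext/history_agents.py | _grab_and_clean_up_lines
-- ===== SOURCE A (Python) =====
-- from typing import Optional, Union, Any
--
-- def _grab_and_clean_up_lines(md_lines: list[str], start_line: int, end_line: Optional[int] = None) -> str:
--     """
--     Grab a snippet of the markdown content by start and end line numbers and clean it up (remove leading
--     and trailing empty lines).
--     """
--     if end_line is None:
--         end_line = len(md_lines)
--
--     content_lines = md_lines[start_line:end_line]
--
--     # remove leading and trailing empty lines (but keep the leading and trailing whitespaces of the
--     # non-empty lines)
--     while content_lines and not content_lines[0].strip():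
--         content_lines.pop(0)
--     while content_lines and not content_lines[-1].strip():
--         content_lines.pop()
--
--     if not content_lines:
--         # there is no content in this section
--         return ""
--
--     return "\n".join(content_lines)
-- ===== SOURCE B (Python) =====
-- def _grab_and_clean_up_lines(md_lines, start_line, end_line=None):
--     if end_line is None:
--         end_line = len(md_lines)
--     lines = md_lines[start_line:end_line]
--     # indices of the non-blank lines, one pass; slice between first and last
--     idx = [k for k, line in enumerate(lines) if line.strip()]
--     if not idx:
--         return ""
--     return "\n".join(lines[idx[0]: idx[-1] + 1])
-- ===== Notes on version B (the rewrite author's own statement) =====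
-- stated objective: simpler
-- what changed: Instead of repeatedly popping blank lines off both ends of the sliced list, B collects the indices of the non-blank lines in one enumerate pass and joins the single slice between the first and last such index.
import Mathlib
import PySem

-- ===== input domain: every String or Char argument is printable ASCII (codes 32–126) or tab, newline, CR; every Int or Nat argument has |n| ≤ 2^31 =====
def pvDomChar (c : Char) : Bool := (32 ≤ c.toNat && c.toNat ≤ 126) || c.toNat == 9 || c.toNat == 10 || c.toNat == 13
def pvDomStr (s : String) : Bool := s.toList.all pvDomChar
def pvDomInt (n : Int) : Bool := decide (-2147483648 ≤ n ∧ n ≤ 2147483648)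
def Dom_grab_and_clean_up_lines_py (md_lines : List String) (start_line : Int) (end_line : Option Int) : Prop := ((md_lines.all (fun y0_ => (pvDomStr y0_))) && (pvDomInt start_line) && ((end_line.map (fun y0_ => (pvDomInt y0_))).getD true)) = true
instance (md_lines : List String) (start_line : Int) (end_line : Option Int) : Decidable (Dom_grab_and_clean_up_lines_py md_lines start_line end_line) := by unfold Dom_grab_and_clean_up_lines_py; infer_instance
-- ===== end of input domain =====

-- B replaces A's two pop-loops by one enumerate pass collecting non-blank indices and a single slice (simpler, non-mutating).


-- ===== PORT A =====
-- 'while content_lines and not content_lines[0].strip(): content_lines.pop(0)'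
def pvDropLeadingBlank : List String → List String
  | [] => []
  | l :: ls => if PySem.Str.strip l = "" then pvDropLeadingBlank ls else l :: ls

def grab_and_clean_up_lines_py (md_lines : List String) (start_line : Int) (end_line : Option Int) : String :=
  let e := end_line.getD (md_lines.length : Int)
  let content0 := PySem.List.slice md_lines (some start_line) (some e)
  let content1 := pvDropLeadingBlank content0
  -- 'while content_lines and not content_lines[-1].strip(): content_lines.pop()' — the same loop popping from the back
  let content2 := (pvDropLeadingBlank content1.reverse).reverse
  if content2 = [] then "" else PySem.Str.join "\n" content2

-- ===== PORT B =====
def grab_and_clean_up_lines_py_alt (md_lines : List String) (start_line : Int) (end_line : Option Int) : String :=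
  let e := end_line.getD (md_lines.length : Int)
  let lines := PySem.List.slice md_lines (some start_line) (some e)
  let idx := (PySem.List.enumerate lines 0).filterMap
    (fun p => if PySem.Str.strip p.2 = "" then none else some p.1)
  match idx with
  | [] => ""
  | i :: _ => PySem.Str.join "\n" (PySem.List.slice lines (some i) (some (idx.getLastD 0 + 1)))

-- ===== PRECONDITION & SPEC =====
def Spec_grab_and_clean_up_lines_py (md_lines : List String) (start_line : Int) (end_line : Option Int) (out : String) : Prop := out = grab_and_clean_up_lines_py_alt md_lines start_line end_line
instance (md_lines : List String) (start_line : Int) (end_line : Option Int) (out : String) : Decidable (Spec_grab_and_clean_up_lines_py md_lines start_line end_line out) := by unfold Spec_grab_and_clean_up_lines_py; infer_instance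

-- ===== CLAIM (what is proved, stated in full; the proofs are below) =====
def Claim_equal_grab_and_clean_up_lines_py : Prop := ∀ (md_lines : List String) (start_line : Int) (end_line : Option Int), Dom_grab_and_clean_up_lines_py md_lines start_line end_line → Spec_grab_and_clean_up_lines_py md_lines start_line end_line (grab_and_clean_up_lines_py md_lines start_line end_line)

-- ===== LEMMAS AND PROOFS =====

def pvIdx (ls : List String) (s : Int) : List Int :=
  (PySem.List.enumerate ls s).filterMap
    (fun p => if PySem.Str.strip p.2 = "" then none else some p.1)

theorem pvIdx_nil (s : Int) : pvIdx [] s = [] := rfl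

theorem pvIdx_cons (l : String) (ls : List String) (s : Int) :
    pvIdx (l :: ls) s =
      (if PySem.Str.strip l = "" then pvIdx ls (s + 1) else s :: pvIdx ls (s + 1)) := by
  by_cases h : PySem.Str.strip l = "" <;> simp [pvIdx, PySem.List.enumerate_cons, h]

theorem pvIdx_shift (ls : List String) (s : Int) :
    pvIdx ls s = (pvIdx ls 0).map (s + ·) := by
  induction ls generalizing s with
  | nil => simp [pvIdx_nil]
  | cons l ls ih =>
    rw [pvIdx_cons, pvIdx_cons]
    have key : pvIdx ls (s + 1) = List.map (fun x => s + x) (pvIdx ls (0 + 1)) := by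
      rw [ih (s+1), ih (0+1), List.map_map]
      congr 1; funext x; simp [Function.comp]; ring
    by_cases h : PySem.Str.strip l = ""
    · simpa [h] using key
    · simp only [h, if_false, List.map_cons]
      rw [key]; simp

theorem pvIdx_bounds (ls : List String) (x : Int) (hx : x ∈ pvIdx ls 0) :
    0 ≤ x ∧ x < (ls.length : Int) := by
  induction ls generalizing x with
  | nil => simp [pvIdx_nil] at hx
  | cons l ls ih =>
    rw [pvIdx_cons, pvIdx_shift ls (0+1)] at hx
    by_cases h : PySem.Str.strip l = ""
    · simp only [h, if_true, List.mem_map] at hx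
      obtain ⟨y, hy, rfl⟩ := hx
      have := ih y hy
      simp only [List.length_cons]
      push_cast; omega
    · simp only [h, if_false, List.mem_cons, List.mem_map] at hx
      rcases hx with rfl | ⟨y, hy, rfl⟩
      · simp only [List.length_cons]; push_cast; exact ⟨by trivial, by positivity⟩
      · have := ih y hy
        simp only [List.length_cons]; push_cast; omega


theorem pvGetLastD_mem (l : List Int) (d : Int) (h : l ≠ []) : l.getLastD d ∈ l := by
  induction l generalizing d with
  | nil => cases h rfl
  | cons a t ih =>
    rw [List.getLastD_cons]
    cases t with
    | nil => simp
    | cons b u => exact List.mem_cons_of_mem a (ih a (by simp))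

theorem pvIdx_append_singleton (xs : List String) (x : String) :
    pvIdx (xs ++ [x]) 0 =
      pvIdx xs 0 ++ (if PySem.Str.strip x = "" then [] else [(xs.length : Int)]) := by
  by_cases h : PySem.Str.strip x = "" <;>
    simp [pvIdx, PySem.List.enumerate_append, PySem.List.enumerate_cons,
      PySem.List.enumerate_nil, h]

theorem pvTrailing (xs : List String) :
    (pvDropLeadingBlank xs.reverse).reverse =
      xs.take ((pvIdx xs 0).getLastD (-1) + 1).toNat := by
  induction xs using List.reverseRecOn with
  | nil => rfl
  | append_singleton xs x ih =>
    rw [pvIdx_append_singleton]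
    by_cases h : PySem.Str.strip x = ""
    · simp only [h, if_true, List.append_nil, List.reverse_append, List.reverse_singleton,
        List.singleton_append]
      rw [show pvDropLeadingBlank (x :: xs.reverse) = pvDropLeadingBlank xs.reverse from by
        simp [pvDropLeadingBlank, h]]
      rw [ih]
      have hm : ((pvIdx xs 0).getLastD (-1) + 1).toNat ≤ xs.length := by
        cases hceq : pvIdx xs 0 with
        | nil => simp
        | cons a t =>
          have hmem : (a :: t).getLastD (-1) ∈ a :: t := pvGetLastD_mem _ _ (by simp)
          have hb := pvIdx_bounds xs ((a :: t).getLastD (-1)) (by rw [hceq]; exact hmem)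
          omega
      rw [List.take_append_of_le_length hm]
    · simp only [h, if_false, List.reverse_append, List.reverse_singleton,
        List.singleton_append, List.getLastD_concat]
      rw [show pvDropLeadingBlank (x :: xs.reverse) = x :: xs.reverse from by
        simp [pvDropLeadingBlank, h]]
      rw [show ((xs.length : Int) + 1).toNat = xs.length + 1 from by omega]
      rw [List.take_of_length_le (by simp)]
      simp

def pvCoreA (ls : List String) : String :=
  let t := (pvDropLeadingBlank (pvDropLeadingBlank ls).reverse).reverse
  if t = [] then "" else PySem.Str.join "\n" t

def pvCoreB (ls : List String) : String :=
  match pvIdx ls 0 with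
  | [] => ""
  | i :: _ => PySem.Str.join "\n" (PySem.List.slice ls (some i) (some ((pvIdx ls 0).getLastD 0 + 1)))

theorem pvCoreB_nil (ls : List String) (h : pvIdx ls 0 = []) : pvCoreB ls = "" := by
  unfold pvCoreB; rw [h]

theorem pvCoreB_cons (ls : List String) (i : Int) (t : List Int) (h : pvIdx ls 0 = i :: t) :
    pvCoreB ls = PySem.Str.join "\n"
      (PySem.List.slice ls (some i) (some ((i :: t).getLastD 0 + 1))) := by
  unfold pvCoreB; rw [h]

theorem pvGetLastD_map_shift (i : Int) (t : List Int) :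
    ((i :: t).map (1 + ·)).getLastD 0 = 1 + (i :: t).getLastD 0 := by
  induction t generalizing i with
  | nil => rfl
  | cons b u ih => simpa [List.getLastD_cons] using ih b

theorem pvCore_eq (ls : List String) : pvCoreA ls = pvCoreB ls := by
  induction ls with
  | nil => rfl
  | cons l ls ih =>
    by_cases h : PySem.Str.strip l = ""
    · have hA : pvCoreA (l :: ls) = pvCoreA ls := by
        unfold pvCoreA
        rw [show pvDropLeadingBlank (l :: ls) = pvDropLeadingBlank ls from by
          simp [pvDropLeadingBlank, h]]
      have hidx : pvIdx (l :: ls) 0 = (pvIdx ls 0).map (1 + ·) := by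
        rw [pvIdx_cons]; simp only [h, if_true, zero_add]; exact pvIdx_shift ls 1
      rw [hA, ih]
      cases hceq : pvIdx ls 0 with
      | nil =>
        rw [pvCoreB_nil ls hceq, pvCoreB_nil (l :: ls) (by rw [hidx, hceq]; rfl)]
      | cons i t =>
        obtain ⟨hi0, hil⟩ := pvIdx_bounds ls i (by rw [hceq]; exact List.mem_cons_self ..)
        have hglmem : (i :: t).getLastD 0 ∈ i :: t := pvGetLastD_mem _ _ (by simp)
        obtain ⟨hj0, hjl⟩ := pvIdx_bounds ls ((i :: t).getLastD 0) (by rw [hceq]; exact hglmem)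
        rw [pvCoreB_cons ls i t hceq,
            pvCoreB_cons (l :: ls) (1 + i) (t.map (1 + ·)) (by rw [hidx, hceq]; rfl)]
        rw [show ((1 + i) :: t.map (1 + ·)) = (i :: t).map (1 + ·) from by simp]
        rw [pvGetLastD_map_shift]
        rw [PySem.List.slice_toNat (l :: ls) (by omega) (by omega),
            PySem.List.slice_toNat ls (by omega) (by omega)]
        refine congrArg (PySem.Str.join "\n") ?_
        rw [show (1 + i).toNat = i.toNat + 1 from by omega]
        rw [List.drop_succ_cons]
        refine congrArg (List.drop i.toNat ls).take ?_
        omega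
    · have hidx : pvIdx (l :: ls) 0 = 0 :: (pvIdx ls 0).map (1 + ·) := by
        rw [pvIdx_cons]; simp only [h, if_false, zero_add]; rw [pvIdx_shift ls 1]
      have hglmem : ((0 : Int) :: (pvIdx ls 0).map (1 + ·)).getLastD 0
          ∈ (0 : Int) :: (pvIdx ls 0).map (1 + ·) := pvGetLastD_mem _ _ (by simp)
      obtain ⟨hg0, hgl⟩ := pvIdx_bounds (l :: ls) _ (by rw [hidx]; exact hglmem)
      rw [List.getLastD_cons] at hg0 hgl
      unfold pvCoreA
      rw [show pvDropLeadingBlank (l :: ls) = l :: ls from by simp [pvDropLeadingBlank, h]]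
      rw [pvTrailing (l :: ls), hidx, List.getLastD_cons]
      rw [pvCoreB_cons (l :: ls) 0 ((pvIdx ls 0).map (1 + ·)) hidx, List.getLastD_cons]
      rw [PySem.List.slice_toNat (l :: ls) (by omega) (by omega)]
      simp only [Int.toNat_zero, List.drop_zero, Nat.sub_zero]
      have htn : ((((pvIdx ls 0).map (1 + ·)).getLastD 0 : Int) + 1).toNat
          = (((pvIdx ls 0).map (1 + ·)).getLastD 0 : Int).toNat + 1 := by omega
      rw [htn]
      rw [List.take_succ_cons, if_neg (by simp)]

-- ===== VERDICT (by name: the statement is the Claim_ definition above) =====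
theorem grab_and_clean_up_lines_py_spec : Claim_equal_grab_and_clean_up_lines_py := by
  intro md_lines start_line end_line _
  exact pvCore_eq (PySem.List.slice md_lines (some start_line) (some (end_line.getD (md_lines.length : Int))))
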